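-- pv_equiv track=rewrite | github.com/jonhpark7966/chalna | src/chalna/pipeline.py | _split_on_comma
-- ===== SOURCE A (Python) =====
-- from typing import Callable, List, Optional, Tuple
--
-- def _split_on_comma(text: str) -> List[str]:
--     """
--     Split text on commas with smart criteria.
--
--     Only split if:
--     1. Text before comma >= 8 characters
--     2. Text after comma >= 8 characters
--     3. No other comma within 15 characters before (not a list pattern)
--     """
--     MIN_LENGTH = 8
--     LIST_CHECK_DISTANCE = 15
--
--     # Find all comma positions
--     comma_positions = [i for i, c in enumerate(text) if c == ',']
--
--     if not comma_positions:
--         return [text]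
--
--     # Determine which commas are valid split points
--     valid_splits = []
--
--     for pos in comma_positions:
--         before = text[:pos]
--         after = text[pos + 1:]
--
--         # Check minimum length criteria
--         if len(before.strip()) < MIN_LENGTH or len(after.strip()) < MIN_LENGTH:
--             continue
--
--         # Check if there's another comma within LIST_CHECK_DISTANCE before this one
--         is_list_pattern = False
--         check_start = max(0, pos - LIST_CHECK_DISTANCE)
--         preceding_text = text[check_start:pos]
--         if ',' in preceding_text:
--             is_list_pattern = True
--
--         if not is_list_pattern:
--             valid_splits.append(pos)
--
--     if not valid_splits:
--         return [text]
--
--     # Split at valid positions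
--     result = []
--     last_pos = 0
--
--     for pos in valid_splits:
--         segment = text[last_pos:pos + 1].strip()  # Include comma in previous segment
--         if segment:
--             result.append(segment)
--         last_pos = pos + 1
--
--     # Add remaining text
--     remaining = text[last_pos:].strip()
--     if remaining:
--         result.append(remaining)
--
--     return result
-- ===== SOURCE B (Python) =====
-- from typing import List
--
--
-- def _scan_last(text: str, pred) -> List[int]:
--     """arr[i] = last index j < i with pred(text[j]), or -1 if none; len = len(text)+1."""
--     arr = []
--     cur = -1
--     for i, ch in enumerate(text):
--         arr.append(cur)
--         if pred(ch):
--             cur = i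
--     arr.append(cur)
--     return arr
--
--
-- def _scan_first(text: str, pred) -> List[int]:
--     """arr[i] = first index j >= i with pred(text[j]), or len(text) if none."""
--     n = len(text)
--     arr = [n] * (n + 1)
--     for i in range(n - 1, -1, -1):
--         arr[i] = i if pred(text[i]) else arr[i + 1]
--     return arr
--
--
-- def _split_on_comma(text: str) -> List[str]:
--     n = len(text)
--     last_nw = _scan_last(text, lambda c: not c.isspace())
--     last_comma = _scan_last(text, lambda c: c == ',')
--     first_nw = _scan_first(text, lambda c: not c.isspace())
--     F = first_nw[0]          # first non-whitespace index overall
--     L = last_nw[n]           # last non-whitespace index overall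
--
--     valid = []
--     for pos in range(n):
--         if text[pos] != ',':
--             continue
--         b = last_nw[pos]
--         before_len = b - F + 1 if b >= 0 else 0
--         f = first_nw[pos + 1]
--         after_len = L - f + 1 if f < n else 0
--         if (before_len >= 8 and after_len >= 8
--                 and last_comma[pos] < max(0, pos - 15)):
--             valid.append(pos)
--
--     if not valid:
--         return [text]
--
--     parts = []
--     last = 0
--     for pos in valid:
--         seg = text[last:pos + 1].strip()
--         if seg:
--             parts.append(seg)
--         last = pos + 1
--     rest = text[last:].strip()
--     if rest:
--         parts.append(rest)
--     return parts
-- ===== Notes on version B (the rewrite author's own statement) =====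
-- stated objective: alternative
-- what changed: Replaced the per-comma slicing/stripping with three precomputed linear scans (last non-whitespace before i, last comma before i, first non-whitespace at/after i) so each comma is validated in O(1) from the scan arrays in a single pass.
import Mathlib
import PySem

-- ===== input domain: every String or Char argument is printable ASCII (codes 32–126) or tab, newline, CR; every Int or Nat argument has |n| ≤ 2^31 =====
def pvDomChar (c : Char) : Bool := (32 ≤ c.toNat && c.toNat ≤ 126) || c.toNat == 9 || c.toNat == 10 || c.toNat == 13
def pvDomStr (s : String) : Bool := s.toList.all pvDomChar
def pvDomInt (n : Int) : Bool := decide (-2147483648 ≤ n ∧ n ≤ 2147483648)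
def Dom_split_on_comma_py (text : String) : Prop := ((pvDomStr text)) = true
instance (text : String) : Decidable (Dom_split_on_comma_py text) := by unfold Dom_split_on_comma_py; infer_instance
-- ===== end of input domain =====

-- B replaces A's per-comma slicing/stripping by three precomputed linear scans; equal return value proved on all inputs.

-- ===== PORT A =====
def split_on_comma_py (text : String) : List String :=
  let cs := text.toList
  -- comma_positions = [i for i, c in enumerate(text) if c == ',']
  let commaPositions : List Int :=
    ((PySem.List.enumerate cs).filter (fun p => p.2 == ',')).map (fun p => p.1)
  if commaPositions = [] then [text]
  else
    -- for pos in comma_positions: … valid_splits.append(pos)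
    let validSplits : List Int := commaPositions.foldl (fun acc pos =>
      let before := PySem.List.slice cs none (some pos)
      let after := PySem.List.slice cs (some (pos + 1)) none
      if (PySem.Chars.strip before).length < 8 ∨ (PySem.Chars.strip after).length < 8 then acc
      else
        let checkStart := max 0 (pos - 15)
        let precedingText := PySem.List.slice cs (some checkStart) (some pos)
        let isListPattern := PySem.Chars.isIn [','] precedingText
        if isListPattern then acc else acc ++ [pos]) []
    if validSplits = [] then [text]
    else
      -- for pos in valid_splits: segment = text[last_pos:pos+1].strip() …
      let st := validSplits.foldl (fun (st : List (List Char) × Int) pos =>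
        let segment := PySem.Chars.strip (PySem.List.slice cs (some st.2) (some (pos + 1)))
        ((if segment = [] then st.1 else st.1 ++ [segment]), pos + 1)) ([], 0)
      let remaining := PySem.Chars.strip (PySem.List.slice cs (some st.2) none)
      let result := if remaining = [] then st.1 else st.1 ++ [remaining]
      result.map (fun l => String.ofList l)

-- ===== PORT B =====
-- arr[i] = last index j < i with pred text[j], else -1  (Source B _scan_last, built left-to-right)
def pvScanLastAux (pred : Char → Bool) : List Char → Int → Int → List Int
  | [], _, cur => [cur]
  | c :: rest, i, cur => cur :: pvScanLastAux pred rest (i + 1) (if pred c then i else cur)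

def pvScanLast (cs : List Char) (pred : Char → Bool) : List Int :=
  pvScanLastAux pred cs 0 (-1)

-- arr[i] = first index j ≥ i with pred text[j], else len(text)  (Source B _scan_first, built right-to-left)
def pvScanFirst (pred : Char → Bool) : List Char → Int → List Int
  | [], i => [i]
  | c :: rest, i =>
    let t := pvScanFirst pred rest (i + 1)
    (if pred c then i else t.headD (i + 1)) :: t

def split_on_comma_py_alt (text : String) : List String :=
  let cs := text.toList
  let n : Int := cs.length
  let lastNw := pvScanLast cs (fun c => !PySem.Chars.isspace c)
  let lastComma := pvScanLast cs (fun c => c == ',')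
  let firstNw := pvScanFirst (fun c => !PySem.Chars.isspace c) cs 0
  let F := PySem.List.pyGetD firstNw 0 0        -- first non-whitespace index overall
  let L := PySem.List.pyGetD lastNw n (-1)      -- last non-whitespace index overall
  let valid : List Int := (PySem.List.pyRange 0 n 1).foldl (fun acc pos =>
    if ¬ (PySem.List.pyGetD cs pos ' ' = ',') then acc
    else
      let b := PySem.List.pyGetD lastNw pos (-1)
      let beforeLen := if b ≥ 0 then b - F + 1 else 0
      let f := PySem.List.pyGetD firstNw (pos + 1) 0
      let afterLen := if f < n then L - f + 1 else 0
      if beforeLen ≥ 8 ∧ afterLen ≥ 8 ∧ PySem.List.pyGetD lastComma pos (-1) < max 0 (pos - 15)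
      then acc ++ [pos] else acc) []
  if valid = [] then [text]
  else
    let st := valid.foldl (fun (st : List (List Char) × Int) pos =>
      let seg := PySem.Chars.strip (PySem.List.slice cs (some st.2) (some (pos + 1)))
      ((if seg = [] then st.1 else st.1 ++ [seg]), pos + 1)) ([], 0)
    let rest := PySem.Chars.strip (PySem.List.slice cs (some st.2) none)
    let result := if rest = [] then st.1 else st.1 ++ [rest]
    result.map (fun l => String.ofList l)

-- ===== PRECONDITION & SPEC =====
def Spec_split_on_comma_py (text : String) (out : List String) : Prop := out = split_on_comma_py_alt text
instance (text : String) (out : List String) : Decidable (Spec_split_on_comma_py text out) := by unfold Spec_split_on_comma_py; infer_instance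

-- ===== CLAIM (what is proved, stated in full; the proofs are below) =====
def Claim_equal_split_on_comma_py : Prop := ∀ (text : String), Dom_split_on_comma_py text → Spec_split_on_comma_py text (split_on_comma_py text)

-- ===== LEMMAS AND PROOFS =====

-- proof-only helpers: the two ports' per-comma validity predicates, and the shared assembly step
def pvCondA (cs : List Char) (pos : Int) : Bool :=
  !decide ((PySem.Chars.strip (PySem.List.slice cs none (some pos))).length < 8 ∨
      (PySem.Chars.strip (PySem.List.slice cs (some (pos + 1)) none)).length < 8) &&
  !PySem.Chars.isIn [','] (PySem.List.slice cs (some (max 0 (pos - 15))) (some pos))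

def pvCondB (cs : List Char) (pos : Int) : Bool :=
  decide (PySem.List.pyGetD cs pos ' ' = ',') &&
  (let n : Int := cs.length
   let b := PySem.List.pyGetD (pvScanLast cs (fun c => !PySem.Chars.isspace c)) pos (-1)
   let beforeLen := if b ≥ 0 then b - PySem.List.pyGetD (pvScanFirst (fun c => !PySem.Chars.isspace c) cs 0) 0 0 + 1 else 0
   let f := PySem.List.pyGetD (pvScanFirst (fun c => !PySem.Chars.isspace c) cs 0) (pos + 1) 0
   let afterLen := if f < n then PySem.List.pyGetD (pvScanLast cs (fun c => !PySem.Chars.isspace c)) n (-1) - f + 1 else 0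
   decide (beforeLen ≥ 8 ∧ afterLen ≥ 8 ∧
     PySem.List.pyGetD (pvScanLast cs (fun c => c == ',')) pos (-1) < max 0 (pos - 15)))

def pvAssemble (text : String) (cs : List Char) (valid : List Int) : List String :=
  if valid = [] then [text]
  else
    let st := valid.foldl (fun (st : List (List Char) × Int) pos =>
      let seg := PySem.Chars.strip (PySem.List.slice cs (some st.2) (some (pos + 1)))
      ((if seg = [] then st.1 else st.1 ++ [seg]), pos + 1)) ([], 0)
    let rest := PySem.Chars.strip (PySem.List.slice cs (some st.2) none)
    let result := if rest = [] then st.1 else st.1 ++ [rest]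
    result.map (fun l => String.ofList l)

-- generic takeWhile facts specialised to what the two programs compare
lemma pv_tw_le {α : Type} (p : α → Bool) (l : List α) : (l.takeWhile p).length ≤ l.length :=
  (List.takeWhile_prefix p).length_le

lemma pv_tw_all_iff {α : Type} (p : α → Bool) (l : List α) :
    (l.takeWhile p).length = l.length ↔ ∀ x ∈ l, p x = true := by
  constructor
  · intro h x hx
    have heq := (List.takeWhile_prefix p (l := l)).eq_of_length h
    exact List.mem_takeWhile_imp (show x ∈ l.takeWhile p from by rw [heq]; exact hx)
  · intro h; rw [List.takeWhile_eq_self_iff.mpr h]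

lemma pv_tw_ge_iff {α : Type} (p : α → Bool) (l : List α) (j : Nat) (hj : j ≤ l.length) :
    j ≤ (l.takeWhile p).length ↔ ∀ x ∈ l.take j, p x = true := by
  induction l generalizing j with
  | nil => simp at hj; simp [hj]
  | cons c rest ih =>
    cases j with
    | zero => simp
    | succ j' =>
      simp only [List.length_cons, Nat.add_le_add_iff_right] at hj
      by_cases hc : p c
      · rw [List.takeWhile_cons_of_pos hc, List.take_succ_cons]
        simp only [List.length_cons, Nat.add_le_add_iff_right, List.mem_cons]
        rw [ih j' hj]
        constructor
        · rintro h x (rfl | hx)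
          · exact hc
          · exact h x hx
        · intro h x hx
          exact h x (Or.inr hx)
      · simp only [List.takeWhile_cons_of_neg hc, List.length_nil, List.take_succ_cons]
        constructor
        · omega
        · intro h; exact absurd (h c (by simp)) hc

lemma pv_dw_len {α : Type} (p : α → Bool) (l : List α) :
    (l.dropWhile p).length = l.length - (l.takeWhile p).length := by
  have := congrArg List.length (List.takeWhile_append_dropWhile (p := p) (l := l))
  simp only [List.length_append] at this
  omega

lemma pv_tw_append_left {α : Type} (p : α → Bool) (l₁ l₂ : List α)
    (h : ∃ x ∈ l₁, p x = false) : (l₁ ++ l₂).takeWhile p = l₁.takeWhile p := by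
  rw [List.takeWhile_append]
  rw [if_neg]
  intro hlen
  obtain ⟨x, hx, hpx⟩ := h
  have := (pv_tw_all_iff p l₁).mp hlen x hx
  simp [this] at hpx

-- len(l.strip()) as a function of the whitespace runs at the two ends
lemma pv_strip_length (l : List Char) :
    (PySem.Chars.strip l).length =
      l.length - (l.takeWhile PySem.Chars.isspace).length -
        (l.reverse.takeWhile PySem.Chars.isspace).length := by
  unfold PySem.Chars.strip PySem.Chars.rstrip PySem.Chars.lstrip
  by_cases hd : l.dropWhile PySem.Chars.isspace = []
  · rw [hd]
    have hall : ∀ x ∈ l, PySem.Chars.isspace x = true := List.dropWhile_eq_nil_iff.mp hd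
    have := (pv_tw_all_iff PySem.Chars.isspace l).mpr hall
    simp [this]
  · have hc : PySem.Chars.isspace ((l.dropWhile PySem.Chars.isspace).head hd) = false :=
      List.head_dropWhile_not PySem.Chars.isspace (w := hd)
    have hex : ∃ x ∈ (l.dropWhile PySem.Chars.isspace).reverse, PySem.Chars.isspace x = false :=
      ⟨_, List.mem_reverse.mpr (List.head_mem hd), hc⟩
    have hrev : l.reverse =
        (l.dropWhile PySem.Chars.isspace).reverse ++ (l.takeWhile PySem.Chars.isspace).reverse := by
      rw [← List.reverse_append, List.takeWhile_append_dropWhile]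
    rw [hrev, pv_tw_append_left _ _ _ hex]
    have h1 := pv_tw_le PySem.Chars.isspace l
    have h2 := pv_dw_len PySem.Chars.isspace l
    have h3 := pv_dw_len PySem.Chars.isspace (l.dropWhile PySem.Chars.isspace).reverse
    simp only [List.length_reverse] at *
    omega

-- the scan arrays of B, characterised entry by entry
lemma pvScanLastAux_getElem? (pred : Char → Bool) (cs : List Char) (i cur : Int) (k : Nat)
    (hk : k ≤ cs.length) :
    (pvScanLastAux pred cs i cur)[k]? =
      some (if (cs.take k).all (fun c => !pred c) then cur
            else i + k - 1 - ((cs.take k).reverse.takeWhile (fun c => !pred c)).length) := by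
  induction cs generalizing i cur k with
  | nil =>
    have : k = 0 := Nat.le_zero.mp hk
    subst this
    simp [pvScanLastAux]
  | cons c rest ih =>
    cases k with
    | zero => simp [pvScanLastAux]
    | succ j =>
      have hj : j ≤ rest.length := by simpa using hk
      have hlen : (List.take j rest).length = j := by simp [List.length_take, hj]
      have htwle := pv_tw_le (fun c => !pred c) (List.take j rest).reverse
      simp only [pvScanLastAux, List.getElem?_cons_succ]
      rw [ih _ _ j hj, List.take_succ_cons, List.reverse_cons, List.takeWhile_append]
      have hiffCA : (List.takeWhile (fun c => !pred c) (List.take j rest).reverse).length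
            = (List.take j rest).reverse.length ↔ ((List.take j rest).all (fun c => !pred c)) = true := by
        rw [pv_tw_all_iff, List.all_eq_true]
        constructor
        · intro h x hx; exact h x (List.mem_reverse.mpr hx)
        · intro h x hx; exact h x (List.mem_reverse.mp hx)
      have hBC : ((c :: List.take j rest).all (fun c => !pred c)) = true ↔
          ((!pred c) = true ∧ ((List.take j rest).all (fun c => !pred c)) = true) := by
        simp [List.all_cons]
      have h1 : (List.takeWhile (fun c => !pred c) [c]).length = if pred c then 0 else 1 := by
        by_cases hc : pred c
        · rw [List.takeWhile_cons_of_neg (by simp [hc])]; simp [hc]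
        · rw [List.takeWhile_cons_of_pos (by simp [hc])]; simp [hc]
      split_ifs <;> simp_all [List.takeWhile_cons, List.length_take] <;> omega

lemma pvScanLast_getElem? (pred : Char → Bool) (cs : List Char) (k : Nat) (hk : k ≤ cs.length) :
    (pvScanLast cs pred)[k]? =
      some ((k : Int) - 1 - ((cs.take k).reverse.takeWhile (fun c => !pred c)).length) := by
  unfold pvScanLast
  rw [pvScanLastAux_getElem? pred cs 0 (-1) k hk]
  by_cases hall : (cs.take k).all (fun c => !pred c)
  · rw [if_pos hall]
    have htwl : ((cs.take k).reverse.takeWhile (fun c => !pred c)).length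
        = (cs.take k).reverse.length := by
      rw [pv_tw_all_iff]
      intro x hx
      exact List.all_eq_true.mp hall x (List.mem_reverse.mp hx)
    rw [htwl, List.length_reverse]
    have : (cs.take k).length = k := by simp [List.length_take, hk]
    rw [this]
    congr 1
    omega
  · rw [if_neg hall]
    congr 1
    omega

lemma pvScanFirst_getElem? (pred : Char → Bool) (cs : List Char) (i : Int) (k : Nat)
    (hk : k ≤ cs.length) :
    (pvScanFirst pred cs i)[k]? =
      some (i + k + ((cs.drop k).takeWhile (fun c => !pred c)).length) := by
  induction cs generalizing i k with
  | nil =>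
    have : k = 0 := Nat.le_zero.mp hk
    subst this
    simp [pvScanFirst]
  | cons c rest ih =>
    cases k with
    | zero =>
      simp only [pvScanFirst, List.getElem?_cons_zero, List.drop_zero]
      by_cases hc : pred c
      · rw [if_pos hc, List.takeWhile_cons_of_neg (by simp [hc])]
        simp
      · rw [if_neg hc, List.takeWhile_cons_of_pos (by simp [hc])]
        have hh : (pvScanFirst pred rest (i + 1)).headD (i + 1)
            = i + 1 + 0 + ((rest.drop 0).takeWhile (fun c => !pred c)).length := by
          have h0 := ih (i + 1) 0 (Nat.zero_le _)
          rw [List.headD_eq_head?_getD, List.head?_eq_getElem?, h0]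
          rfl
        rw [hh]
        simp only [List.drop_zero, List.length_cons]
        congr 1
        push_cast
        ring
    | succ j =>
      have hj : j ≤ rest.length := by simpa using hk
      simp only [pvScanFirst, List.getElem?_cons_succ]
      rw [ih (i + 1) j hj, List.drop_succ_cons]
      congr 1
      push_cast
      ring

lemma pv_singleton_infix_iff {α : Type} {a : α} {l : List α} : [a] <:+: l ↔ a ∈ l := by
  constructor
  · intro h
    exact h.mem (by simp)
  · intro h
    obtain ⟨s, t, rfl⟩ := List.mem_iff_append.mp h
    exact ⟨s, t, by simp⟩

lemma pv_before_iff (cs : List Char) (k : Nat) (hk : k ≤ cs.length) :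
    (¬ (PySem.Chars.strip (cs.take k)).length < 8) ↔
      (if (k : Int) - 1 - ((cs.take k).reverse.takeWhile PySem.Chars.isspace).length ≥ 0
       then (k : Int) - 1 - ((cs.take k).reverse.takeWhile PySem.Chars.isspace).length -
              (cs.takeWhile PySem.Chars.isspace).length + 1
       else 0) ≥ 8 := by
  have hlen : (cs.take k).length = k := by simp [List.length_take, hk]
  have hr : ((cs.take k).reverse.takeWhile PySem.Chars.isspace).length ≤ k := by
    have := pv_tw_le PySem.Chars.isspace (cs.take k).reverse
    simpa [hlen] using this
  have hsl := pv_strip_length (cs.take k)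
  rw [hlen] at hsl
  by_cases hrk : ((cs.take k).reverse.takeWhile PySem.Chars.isspace).length = k
  · rw [if_neg (by omega)]
    omega
  · -- some non-whitespace occurs in cs.take k, so the two takeWhile prefixes agree
    have hex : ∃ x ∈ cs.take k, PySem.Chars.isspace x = false := by
      by_contra hnone
      push Not at hnone
      refine hrk ?_
      have : ((cs.take k).reverse.takeWhile PySem.Chars.isspace).length
          = (cs.take k).reverse.length := by
        rw [pv_tw_all_iff]
        intro x hx
        have := hnone x (List.mem_reverse.mp hx)
        simpa using this
      rw [this, List.length_reverse, hlen]
    have ha0 : cs.takeWhile PySem.Chars.isspace = (cs.take k).takeWhile PySem.Chars.isspace := by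
      conv_lhs => rw [← List.take_append_drop k cs]
      exact pv_tw_append_left _ _ _ hex
    rw [if_pos (by omega), ha0]
    omega
lemma pv_after_iff (cs : List Char) (k : Nat) (hk : k < cs.length) :
    (¬ (PySem.Chars.strip (cs.drop (k + 1))).length < 8) ↔
      (if ((k + 1 : Nat) : Int) + ((cs.drop (k + 1)).takeWhile PySem.Chars.isspace).length <
            (cs.length : Int)
       then ((cs.length : Int) - 1 - (cs.reverse.takeWhile PySem.Chars.isspace).length) -
              (((k + 1 : Nat) : Int) + ((cs.drop (k + 1)).takeWhile PySem.Chars.isspace).length) + 1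
       else 0) ≥ 8 := by
  have hlen : (cs.drop (k + 1)).length = cs.length - (k + 1) := by simp
  have ha' : ((cs.drop (k + 1)).takeWhile PySem.Chars.isspace).length ≤ cs.length - (k + 1) := by
    have := pv_tw_le PySem.Chars.isspace (cs.drop (k + 1))
    omega
  have hsl := pv_strip_length (cs.drop (k + 1))
  rw [hlen] at hsl
  by_cases hall : ((cs.drop (k + 1)).takeWhile PySem.Chars.isspace).length = cs.length - (k + 1)
  · rw [if_neg (by omega)]
    omega
  · have hex : ∃ x ∈ cs.drop (k + 1), PySem.Chars.isspace x = false := by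
      by_contra hnone
      push Not at hnone
      refine hall ?_
      have : (cs.drop (k + 1)).takeWhile PySem.Chars.isspace = cs.drop (k + 1) := by
        rw [List.takeWhile_eq_self_iff]
        intro x hx
        simpa using hnone x hx
      rw [this, hlen]
    have hex' : ∃ x ∈ (cs.drop (k + 1)).reverse, PySem.Chars.isspace x = false := by
      obtain ⟨x, hx, hxf⟩ := hex
      exact ⟨x, List.mem_reverse.mpr hx, hxf⟩
    have hR : cs.reverse.takeWhile PySem.Chars.isspace
        = (cs.drop (k + 1)).reverse.takeWhile PySem.Chars.isspace := by
      conv_lhs => rw [← List.take_append_drop (k + 1) cs, List.reverse_append]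
      exact pv_tw_append_left _ _ _ hex'
    rw [if_pos (by omega), hR]
    have hr' := pv_tw_le PySem.Chars.isspace (cs.drop (k + 1)).reverse
    rw [List.length_reverse, hlen] at hr'
    omega

lemma pv_comma_iff (cs : List Char) (k : Nat) (hk : k ≤ cs.length) :
    (PySem.Chars.isIn [','] ((cs.drop (k - 15)).take (k - (k - 15))) = false) ↔
      ((k : Int) - 1 - ((cs.take k).reverse.takeWhile (fun c => !(c == ','))).length <
        ((k - 15 : Nat) : Int)) := by
  have hlen : (cs.take k).length = k := by simp [List.length_take, hk]
  have hrtc := pv_tw_le (fun c => !(c == ',')) (cs.take k).reverse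
  rw [List.length_reverse, hlen] at hrtc
  have hwin : ((cs.take k).reverse.take (k - (k - 15))) = ((cs.drop (k - 15)).take (k - (k - 15))).reverse := by
    rw [List.take_reverse, hlen]
    have : k - (k - (k - 15)) = k - 15 := by omega
    rw [this, List.drop_take]
  have hiff := pv_tw_ge_iff (fun c => !(c == ',')) (cs.take k).reverse (k - (k - 15))
      (by rw [List.length_reverse, hlen]; omega)
  rw [hwin] at hiff
  rw [PySem.Chars.isIn_eq_false_iff, pv_singleton_infix_iff]
  constructor
  · intro hnot
    have : k - (k - 15) ≤ ((cs.take k).reverse.takeWhile (fun c => !(c == ','))).length := by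
      rw [hiff]
      intro x hx
      have hxm : x ∈ (cs.drop (k - 15)).take (k - (k - 15)) := by
        have := List.mem_reverse.mp hx
        simpa using this
      simp only [Bool.not_eq_true']
      rw [beq_eq_false_iff_ne]
      intro heq
      exact hnot (heq ▸ hxm)
    omega
  · intro hlt hmem
    have hge : k - (k - 15) ≤ ((cs.take k).reverse.takeWhile (fun c => !(c == ','))).length := by omega
    have := hiff.mp hge ',' (by
      rw [List.mem_reverse] at *
      simpa using hmem)
    simp at this
lemma pv_foldA (cs : List Char) (l : List Int) (acc : List Int) :
    l.foldl (fun acc pos =>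
      let before := PySem.List.slice cs none (some pos)
      let after := PySem.List.slice cs (some (pos + 1)) none
      if (PySem.Chars.strip before).length < 8 ∨ (PySem.Chars.strip after).length < 8 then acc
      else
        let checkStart := max 0 (pos - 15)
        let precedingText := PySem.List.slice cs (some checkStart) (some pos)
        let isListPattern := PySem.Chars.isIn [','] precedingText
        if isListPattern then acc else acc ++ [pos]) acc
    = acc ++ l.filter (pvCondA cs) := by
  induction l generalizing acc with
  | nil => simp
  | cons pos l ih =>
    rw [List.foldl_cons, ih, List.filter_cons]
    by_cases h1 : (PySem.Chars.strip (PySem.List.slice cs none (some pos))).length < 8 ∨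
        (PySem.Chars.strip (PySem.List.slice cs (some (pos + 1)) none)).length < 8
    · simp [pvCondA, h1]
    · by_cases h2 : PySem.Chars.isIn [','] (PySem.List.slice cs (some (max 0 (pos - 15))) (some pos)) = true
      · simp [pvCondA, h1, h2]
      · simp [pvCondA, h1, h2, List.append_assoc]

lemma pv_foldB (cs : List Char) (l : List Int) (acc : List Int) :
    l.foldl (fun acc pos =>
      if ¬ (PySem.List.pyGetD cs pos ' ' = ',') then acc
      else
        let b := PySem.List.pyGetD (pvScanLast cs (fun c => !PySem.Chars.isspace c)) pos (-1)
        let beforeLen := if b ≥ 0 then b - PySem.List.pyGetD (pvScanFirst (fun c => !PySem.Chars.isspace c) cs 0) 0 0 + 1 else 0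
        let f := PySem.List.pyGetD (pvScanFirst (fun c => !PySem.Chars.isspace c) cs 0) (pos + 1) 0
        let afterLen := if f < (cs.length : Int) then PySem.List.pyGetD (pvScanLast cs (fun c => !PySem.Chars.isspace c)) (cs.length : Int) (-1) - f + 1 else 0
        if beforeLen ≥ 8 ∧ afterLen ≥ 8 ∧ PySem.List.pyGetD (pvScanLast cs (fun c => c == ',')) pos (-1) < max 0 (pos - 15)
        then acc ++ [pos] else acc) acc
    = acc ++ l.filter (pvCondB cs) := by
  induction l generalizing acc with
  | nil => simp
  | cons pos l ih =>
    rw [List.foldl_cons, ih, List.filter_cons]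
    have hBdef : pvCondB cs pos = (decide (PySem.List.pyGetD cs pos ' ' = ',') &&
          decide ((if PySem.List.pyGetD (pvScanLast cs (fun c => !PySem.Chars.isspace c)) pos (-1) ≥ 0
            then PySem.List.pyGetD (pvScanLast cs (fun c => !PySem.Chars.isspace c)) pos (-1) -
              PySem.List.pyGetD (pvScanFirst (fun c => !PySem.Chars.isspace c) cs 0) 0 0 + 1 else 0) ≥ 8 ∧
          (if PySem.List.pyGetD (pvScanFirst (fun c => !PySem.Chars.isspace c) cs 0) (pos + 1) 0 < (cs.length : Int)
            then PySem.List.pyGetD (pvScanLast cs (fun c => !PySem.Chars.isspace c)) (cs.length : Int) (-1) -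
              PySem.List.pyGetD (pvScanFirst (fun c => !PySem.Chars.isspace c) cs 0) (pos + 1) 0 + 1 else 0) ≥ 8 ∧
          PySem.List.pyGetD (pvScanLast cs (fun c => c == ',')) pos (-1) < max 0 (pos - 15))) := rfl
    by_cases h1 : PySem.List.pyGetD cs pos ' ' = ','
    · by_cases h2 : (if PySem.List.pyGetD (pvScanLast cs (fun c => !PySem.Chars.isspace c)) pos (-1) ≥ 0
            then PySem.List.pyGetD (pvScanLast cs (fun c => !PySem.Chars.isspace c)) pos (-1) -
              PySem.List.pyGetD (pvScanFirst (fun c => !PySem.Chars.isspace c) cs 0) 0 0 + 1 else 0) ≥ 8 ∧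
          (if PySem.List.pyGetD (pvScanFirst (fun c => !PySem.Chars.isspace c) cs 0) (pos + 1) 0 < (cs.length : Int)
            then PySem.List.pyGetD (pvScanLast cs (fun c => !PySem.Chars.isspace c)) (cs.length : Int) (-1) -
              PySem.List.pyGetD (pvScanFirst (fun c => !PySem.Chars.isspace c) cs 0) (pos + 1) 0 + 1 else 0) ≥ 8 ∧
          PySem.List.pyGetD (pvScanLast cs (fun c => c == ',')) pos (-1) < max 0 (pos - 15)
      · have hv : pvCondB cs pos = true := by
          rw [hBdef, decide_eq_true h1, decide_eq_true h2]
          rfl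
        show (if ¬ (PySem.List.pyGetD cs pos ' ' = ',') then acc
            else if (if PySem.List.pyGetD (pvScanLast cs (fun c => !PySem.Chars.isspace c)) pos (-1) ≥ 0
            then PySem.List.pyGetD (pvScanLast cs (fun c => !PySem.Chars.isspace c)) pos (-1) -
              PySem.List.pyGetD (pvScanFirst (fun c => !PySem.Chars.isspace c) cs 0) 0 0 + 1 else 0) ≥ 8 ∧
          (if PySem.List.pyGetD (pvScanFirst (fun c => !PySem.Chars.isspace c) cs 0) (pos + 1) 0 < (cs.length : Int)
            then PySem.List.pyGetD (pvScanLast cs (fun c => !PySem.Chars.isspace c)) (cs.length : Int) (-1) -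
              PySem.List.pyGetD (pvScanFirst (fun c => !PySem.Chars.isspace c) cs 0) (pos + 1) 0 + 1 else 0) ≥ 8 ∧
          PySem.List.pyGetD (pvScanLast cs (fun c => c == ',')) pos (-1) < max 0 (pos - 15)
            then acc ++ [pos] else acc) ++ List.filter (pvCondB cs) l
          = acc ++ (if pvCondB cs pos = true then pos :: List.filter (pvCondB cs) l
                    else List.filter (pvCondB cs) l)
        rw [if_neg (not_not_intro h1), if_pos h2]
        simp [hv, List.append_assoc]
      · have hv : pvCondB cs pos = false := by
          rw [hBdef, decide_eq_false h2, Bool.and_false]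
        show (if ¬ (PySem.List.pyGetD cs pos ' ' = ',') then acc
            else if (if PySem.List.pyGetD (pvScanLast cs (fun c => !PySem.Chars.isspace c)) pos (-1) ≥ 0
            then PySem.List.pyGetD (pvScanLast cs (fun c => !PySem.Chars.isspace c)) pos (-1) -
              PySem.List.pyGetD (pvScanFirst (fun c => !PySem.Chars.isspace c) cs 0) 0 0 + 1 else 0) ≥ 8 ∧
          (if PySem.List.pyGetD (pvScanFirst (fun c => !PySem.Chars.isspace c) cs 0) (pos + 1) 0 < (cs.length : Int)
            then PySem.List.pyGetD (pvScanLast cs (fun c => !PySem.Chars.isspace c)) (cs.length : Int) (-1) -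
              PySem.List.pyGetD (pvScanFirst (fun c => !PySem.Chars.isspace c) cs 0) (pos + 1) 0 + 1 else 0) ≥ 8 ∧
          PySem.List.pyGetD (pvScanLast cs (fun c => c == ',')) pos (-1) < max 0 (pos - 15)
            then acc ++ [pos] else acc) ++ List.filter (pvCondB cs) l
          = acc ++ (if pvCondB cs pos = true then pos :: List.filter (pvCondB cs) l
                    else List.filter (pvCondB cs) l)
        rw [if_neg (not_not_intro h1), if_neg h2]
        simp [hv]
    · have hv : pvCondB cs pos = false := by
        rw [hBdef, decide_eq_false h1, Bool.false_and]
      show (if ¬ (PySem.List.pyGetD cs pos ' ' = ',') then acc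
            else if (if PySem.List.pyGetD (pvScanLast cs (fun c => !PySem.Chars.isspace c)) pos (-1) ≥ 0
            then PySem.List.pyGetD (pvScanLast cs (fun c => !PySem.Chars.isspace c)) pos (-1) -
              PySem.List.pyGetD (pvScanFirst (fun c => !PySem.Chars.isspace c) cs 0) 0 0 + 1 else 0) ≥ 8 ∧
          (if PySem.List.pyGetD (pvScanFirst (fun c => !PySem.Chars.isspace c) cs 0) (pos + 1) 0 < (cs.length : Int)
            then PySem.List.pyGetD (pvScanLast cs (fun c => !PySem.Chars.isspace c)) (cs.length : Int) (-1) -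
              PySem.List.pyGetD (pvScanFirst (fun c => !PySem.Chars.isspace c) cs 0) (pos + 1) 0 + 1 else 0) ≥ 8 ∧
          PySem.List.pyGetD (pvScanLast cs (fun c => c == ',')) pos (-1) < max 0 (pos - 15)
            then acc ++ [pos] else acc) ++ List.filter (pvCondB cs) l
          = acc ++ (if pvCondB cs pos = true then pos :: List.filter (pvCondB cs) l
                    else List.filter (pvCondB cs) l)
      rw [if_pos h1]
      simp [hv]

lemma pv_A_eq (text : String) :
    split_on_comma_py text =
      pvAssemble text text.toList
        ((((PySem.List.enumerate text.toList).filter (fun p => p.2 == ',')).map (fun p => p.1)).filter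
          (pvCondA text.toList)) := by
  simp only [split_on_comma_py]
  rw [pv_foldA]
  simp only [List.nil_append]
  by_cases hcp : (((PySem.List.enumerate text.toList).filter (fun p => p.2 == ',')).map (fun p => p.1)) = []
  · rw [if_pos hcp, hcp]
    simp [pvAssemble]
  · rw [if_neg hcp]
    rfl

lemma pv_B_eq (text : String) :
    split_on_comma_py_alt text =
      pvAssemble text text.toList
        ((PySem.List.pyRange 0 (text.toList.length : Int)).filter (pvCondB text.toList)) := by
  simp only [split_on_comma_py_alt]
  rw [pv_foldB]
  simp only [List.nil_append]
  rfl

lemma pv_pointwise (cs : List Char) (k : Nat) (hk : k < cs.length) :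
    (pvCondA cs (k : Int) && (PySem.List.pyGetD cs (k : Int) ' ' == ',')) = pvCondB cs (k : Int) := by
  have hk1 : ((k : Int) + 1) = ((k + 1 : Nat) : Int) := by push_cast; ring
  have hmax : max 0 ((k : Int) - 15) = ((k - 15 : Nat) : Int) := by omega
  have hlastNw : PySem.List.pyGetD (pvScanLast cs (fun c => !PySem.Chars.isspace c)) (k : Int) (-1)
      = (k : Int) - 1 - ((cs.take k).reverse.takeWhile PySem.Chars.isspace).length := by
    rw [PySem.List.pyGetD_natCast, List.getD_eq_getElem?_getD, pvScanLast_getElem? _ cs k hk.le]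
    simp [Bool.not_not]
  have hL : PySem.List.pyGetD (pvScanLast cs (fun c => !PySem.Chars.isspace c)) (cs.length : Int) (-1)
      = (cs.length : Int) - 1 - (cs.reverse.takeWhile PySem.Chars.isspace).length := by
    rw [PySem.List.pyGetD_natCast, List.getD_eq_getElem?_getD,
      pvScanLast_getElem? _ cs cs.length le_rfl]
    simp [Bool.not_not, List.take_length]
  have hF : PySem.List.pyGetD (pvScanFirst (fun c => !PySem.Chars.isspace c) cs 0) 0 0
      = ((cs.takeWhile PySem.Chars.isspace).length : Int) := by
    rw [PySem.List.pyGetD_ofNat', List.getD_eq_getElem?_getD,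
      pvScanFirst_getElem? _ cs 0 0 (Nat.zero_le _)]
    simp [Bool.not_not]
  have hf : PySem.List.pyGetD (pvScanFirst (fun c => !PySem.Chars.isspace c) cs 0) ((k : Int) + 1) 0
      = ((k + 1 : Nat) : Int) + ((cs.drop (k + 1)).takeWhile PySem.Chars.isspace).length := by
    rw [hk1, PySem.List.pyGetD_natCast, List.getD_eq_getElem?_getD,
      pvScanFirst_getElem? _ cs 0 (k + 1) (by omega)]
    simp [Bool.not_not]
  have hlc : PySem.List.pyGetD (pvScanLast cs (fun c => c == ',')) (k : Int) (-1)
      = (k : Int) - 1 - ((cs.take k).reverse.takeWhile (fun c => !(c == ','))).length := by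
    rw [PySem.List.pyGetD_natCast, List.getD_eq_getElem?_getD, pvScanLast_getElem? _ cs k hk.le]
    rfl
  have hsl1 : PySem.List.slice cs none (some (k : Int)) = cs.take k :=
    PySem.List.slice_to_natCast cs k
  have hsl2 : PySem.List.slice cs (some ((k : Int) + 1)) none = cs.drop (k + 1) := by
    rw [hk1]
    exact PySem.List.slice_from_natCast cs (k + 1)
  simp only [pvCondA, pvCondB, hsl1, hsl2, hlastNw, hL, hF, hf, hlc, hmax]
  by_cases hc : PySem.List.pyGetD cs (k : Int) ' ' = ','
  · simp only [hc, beq_self_eq_true, Bool.and_true, decide_true, Bool.true_and]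
    rw [Bool.eq_iff_iff]
    simp only [Bool.and_eq_true, Bool.not_eq_true', decide_eq_true_eq, decide_eq_false_iff_not,
      not_or]
    rw [show PySem.List.slice cs (some ((k - 15 : Nat) : Int)) (some (k : Int))
          = (cs.drop (k - 15)).take (k - (k - 15)) from PySem.List.slice_natCast cs (k - 15) k]
    rw [pv_before_iff cs k hk.le, pv_after_iff cs k hk, pv_comma_iff cs k hk.le]
    tauto
  · have hgd : PySem.List.pyGetD cs (k : Int) ' ' = cs[k]?.getD ' ' := by
      rw [PySem.List.pyGetD_natCast, List.getD_eq_getElem?_getD]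
    rw [hgd] at hc
    simp [hc]

-- ===== VERDICT (by name: the statement is the Claim_ definition above) =====
theorem split_on_comma_py_spec : Claim_equal_split_on_comma_py := by
  unfold Claim_equal_split_on_comma_py Spec_split_on_comma_py
  intro text _
  rw [pv_A_eq, pv_B_eq]
  congr 1
  rw [PySem.List.enumerate_eq_map_pyRange text.toList ' ']
  simp only [List.filter_map, List.map_map, List.filter_filter, Function.comp_def,
    PySem.List.len_eq]
  rw [show (List.map (fun x : Int => (x, PySem.List.pyGetD text.toList x ' ').1)
        (List.filter
          (fun a => pvCondA text.toList (a, PySem.List.pyGetD text.toList a ' ').1 &&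
            ((a, PySem.List.pyGetD text.toList a ' ').2 == ','))
          (PySem.List.pyRange 0 (text.toList.length : Int))))
      = (List.filter
          (fun a => pvCondA text.toList a && (PySem.List.pyGetD text.toList a ' ' == ','))
          (PySem.List.pyRange 0 (text.toList.length : Int))) from by simp]
  refine List.filter_congr ?_
  intro x hx
  rw [PySem.List.mem_pyRange_one] at hx
  obtain ⟨k, rfl⟩ : ∃ k : Nat, x = (k : Int) := ⟨x.toNat, (Int.toNat_of_nonneg hx.1).symm⟩
  have hk : k < text.toList.length := by exact_mod_cast hx.2
  exact pv_pointwise text.toList k hk
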